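-- pv_equiv track=rewrite | github.com/zkokalj/HLS_small_area_test | HLS/Sentinel2/HLSS30.py | convert_bit_index
-- ===== SOURCE A (Python) =====
-- def convert_bit_index(x):
--     """
--     Convert x in a bit index.
--     """
--     if x == 666666666:#if x is a non data value
--         return 255
--     x_string = str(x)
--     sum = 0
--     for i in range(1,6):
--         if str(i) in x_string:
--             sum += 2**i
--     return sum
-- ===== SOURCE B (Python) =====
-- def convert_bit_index(x):
--     if x == 666666666:  # non data value
--         return 255
--     s1 = s2 = s3 = s4 = s5 = False
--     for c in str(x):
--         if c == '1':
--             s1 = True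
--         elif c == '2':
--             s2 = True
--         elif c == '3':
--             s3 = True
--         elif c == '4':
--             s4 = True
--         elif c == '5':
--             s5 = True
--     return (2 if s1 else 0) + (4 if s2 else 0) + (8 if s3 else 0) \
--         + (16 if s4 else 0) + (32 if s5 else 0)
-- ===== Notes on version B (the rewrite author's own statement) =====
-- stated objective: alternative
-- what changed: One forward pass over the digits of str(x) maintaining five seen-flags, instead of five substring-membership scans of the whole string; the sum is assembled from the flags at the end.
import Mathlib
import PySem

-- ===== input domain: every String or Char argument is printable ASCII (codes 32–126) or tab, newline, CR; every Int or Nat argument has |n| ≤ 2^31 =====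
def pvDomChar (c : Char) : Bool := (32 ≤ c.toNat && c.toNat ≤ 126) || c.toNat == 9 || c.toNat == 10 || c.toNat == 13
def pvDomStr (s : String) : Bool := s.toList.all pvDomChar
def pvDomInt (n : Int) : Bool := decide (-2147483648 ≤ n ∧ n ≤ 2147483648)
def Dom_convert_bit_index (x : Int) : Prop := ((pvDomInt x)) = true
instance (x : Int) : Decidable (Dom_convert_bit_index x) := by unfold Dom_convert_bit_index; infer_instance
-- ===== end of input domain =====

-- B replaces A's five whole-string membership scans by one forward pass over the
-- digit characters maintaining five seen-flags (objective: alternative decomposition).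

-- ===== PORT A =====
def convert_bit_index (x : Int) : Int :=
  if x = 666666666 then 255
  else
    let x_string := PySem.Int.toChars x
    (PySem.List.pyRange 1 6 1).foldl
      (fun sum i =>
        if PySem.Chars.isIn (PySem.Int.toChars i) x_string then sum + 2 ^ i.toNat else sum) 0

-- ===== PORT B =====
-- one step of B's loop over the characters of str(x)
def pvBStep (t : Bool × Bool × Bool × Bool × Bool) (c : Char) : Bool × Bool × Bool × Bool × Bool :=
  if c = '1' then (true, t.2.1, t.2.2.1, t.2.2.2.1, t.2.2.2.2)
  else if c = '2' then (t.1, true, t.2.2.1, t.2.2.2.1, t.2.2.2.2)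
  else if c = '3' then (t.1, t.2.1, true, t.2.2.2.1, t.2.2.2.2)
  else if c = '4' then (t.1, t.2.1, t.2.2.1, true, t.2.2.2.2)
  else if c = '5' then (t.1, t.2.1, t.2.2.1, t.2.2.2.1, true)
  else t

def convert_bit_index_alt (x : Int) : Int :=
  if x = 666666666 then 255
  else
    let st := (PySem.Int.toChars x).foldl pvBStep (false, false, false, false, false)
    (if st.1 then 2 else 0) + (if st.2.1 then 4 else 0) + (if st.2.2.1 then 8 else 0)
      + (if st.2.2.2.1 then 16 else 0) + (if st.2.2.2.2 then 32 else 0)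

-- ===== PRECONDITION & SPEC =====
def Spec_convert_bit_index (x : Int) (out : Int) : Prop := out = convert_bit_index_alt x
instance (x : Int) (out : Int) : Decidable (Spec_convert_bit_index x out) := by unfold Spec_convert_bit_index; infer_instance

-- ===== CLAIM (what is proved, stated in full; the proofs are below) =====
def Claim_equal_convert_bit_index : Prop := ∀ (x : Int), Dom_convert_bit_index x → Spec_convert_bit_index x (convert_bit_index x)

-- ===== LEMMAS AND PROOFS =====

theorem pv_singleton_infix_iff (a : Char) (l : List Char) : [a] <:+: l ↔ a ∈ l := by
  constructor
  · intro h
    exact h.subset (List.mem_singleton_self a)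
  · intro h
    obtain ⟨s, t, rfl⟩ := List.append_of_mem h
    exact ⟨s, t, by simp⟩

theorem pv_isIn_singleton (a : Char) (l : List Char) :
    PySem.Chars.isIn [a] l = decide (a ∈ l) := by
  by_cases h : a ∈ l
  · simp [h, PySem.Chars.isIn_iff_infix, pv_singleton_infix_iff]
  · simp [h]
    rw [PySem.Chars.isIn_eq_false_iff, pv_singleton_infix_iff]
    exact h

theorem pv_foldB (l : List Char) (t : Bool × Bool × Bool × Bool × Bool) :
    l.foldl pvBStep t =
      (t.1 || decide ('1' ∈ l), t.2.1 || decide ('2' ∈ l), t.2.2.1 || decide ('3' ∈ l),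
       t.2.2.2.1 || decide ('4' ∈ l), t.2.2.2.2 || decide ('5' ∈ l)) := by
  induction l generalizing t with
  | nil => simp
  | cons c cs ih =>
    simp only [List.foldl_cons, ih]
    by_cases h1 : c = '1'
    · subst h1; simp [pvBStep, List.mem_cons]
    by_cases h2 : c = '2'
    · subst h2; simp [pvBStep, List.mem_cons]
    by_cases h3 : c = '3'
    · subst h3; simp [pvBStep, List.mem_cons]
    by_cases h4 : c = '4'
    · subst h4; simp [pvBStep, List.mem_cons]
    by_cases h5 : c = '5'
    · subst h5; simp [pvBStep, List.mem_cons]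
    simp [pvBStep, h1, h2, h3, h4, h5, List.mem_cons, eq_comm]

-- ===== VERDICT (by name: the statement is the Claim_ definition above) =====
theorem convert_bit_index_spec : Claim_equal_convert_bit_index := by
  intro x _
  unfold Spec_convert_bit_index convert_bit_index convert_bit_index_alt
  by_cases hx : x = 666666666
  · simp [hx]
  · simp only [hx, if_false]
    rw [pv_foldB]
    have hr : PySem.List.pyRange 1 6 1 = [1, 2, 3, 4, 5] := by decide
    rw [hr]
    simp only [List.foldl_cons, List.foldl_nil]
    have h1 : PySem.Int.toChars 1 = ['1'] := by decide
    have h2 : PySem.Int.toChars 2 = ['2'] := by decide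
    have h3 : PySem.Int.toChars 3 = ['3'] := by decide
    have h4 : PySem.Int.toChars 4 = ['4'] := by decide
    have h5 : PySem.Int.toChars 5 = ['5'] := by decide
    rw [h1, h2, h3, h4, h5]
    simp only [pv_isIn_singleton]
    set cs := PySem.Int.toChars x
    by_cases m1 : '1' ∈ cs <;> by_cases m2 : '2' ∈ cs <;> by_cases m3 : '3' ∈ cs <;>
      by_cases m4 : '4' ∈ cs <;> by_cases m5 : '5' ∈ cs <;>
      simp [m1, m2, m3, m4, m5]
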